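-- pv_equiv track=rewrite | github.com/LINE-qw/A10 | recognition/patch/tablePatch.py | DS
-- ===== SOURCE A (Python) =====
-- def DS(value):
--     if len(value) == 0:
--         return False
--     for i in value:
--         if '0' <= i <= '9':
--             continue
--         if i == '.' or i == ',' or i == '，':
--             continue
--         return False
--     return True
-- ===== SOURCE B (Python) =====
-- import re
--
-- _DS_RE = re.compile(r'[0-9.,\uFF0C]+')
--
-- def DS(value):
--     return _DS_RE.fullmatch(value) is not None
-- ===== Notes on version B (the rewrite author's own statement) =====
-- stated objective: idiomatic
-- what changed: Replaced the explicit per-character loop with early return by a single compiled-regex fullmatch against the character class [0-9.,，]+, whose + quantifier also covers the empty-string case.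
import Mathlib
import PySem

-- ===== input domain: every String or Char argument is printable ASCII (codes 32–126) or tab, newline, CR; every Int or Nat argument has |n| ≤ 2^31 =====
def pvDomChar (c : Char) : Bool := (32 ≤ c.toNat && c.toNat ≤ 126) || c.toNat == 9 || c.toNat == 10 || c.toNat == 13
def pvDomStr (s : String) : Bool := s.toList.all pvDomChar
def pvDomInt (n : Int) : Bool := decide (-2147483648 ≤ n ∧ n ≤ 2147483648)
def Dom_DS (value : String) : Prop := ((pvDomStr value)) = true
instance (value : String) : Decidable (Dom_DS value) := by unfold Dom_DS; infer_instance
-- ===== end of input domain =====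

-- B replaces A's per-character loop with a single regex-style fullmatch of the class [0-9.,，]+ (idiomatic).

-- ===== PORT A =====
-- the for-loop with early 'return False': structural recursion over the characters
def DSloop : List Char → Bool
  | [] => true
  | i :: rest =>
    if '0' ≤ i ∧ i ≤ '9' then DSloop rest
    else if i = '.' ∨ i = ',' ∨ i = '，' then DSloop rest
    else false

def DS (value : String) : Bool :=
  if PySem.Str.len value = 0 then false else DSloop value.toList

-- ===== PORT B =====
-- the character class [0-9.,，] of B's regex
def DSclass (c : Char) : Bool :=
  ('0' ≤ c && c ≤ '9') || c = '.' || c = ',' || c = '，'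

-- fullmatch of [0-9.,，]+ : at least one character, all in the class
def DS_alt (value : String) : Bool :=
  !value.toList.isEmpty && value.toList.all DSclass

-- ===== PRECONDITION & SPEC =====
def Spec_DS (value : String) (out : Bool) : Prop := out = DS_alt value
instance (value : String) (out : Bool) : Decidable (Spec_DS value out) := by unfold Spec_DS; infer_instance

-- ===== CLAIM (what is proved, stated in full; the proofs are below) =====
def Claim_equal_DS : Prop := ∀ (value : String), Dom_DS value → Spec_DS value (DS value)

-- ===== LEMMAS AND PROOFS =====
theorem DSloop_eq_all (l : List Char) : DSloop l = l.all DSclass := by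
  induction l with
  | nil => rfl
  | cons c rest ih =>
    rw [List.all_cons]
    simp only [DSloop]
    split_ifs with h1 h2
    · have hc : DSclass c = true := by simp [DSclass, h1.1, h1.2]
      rw [hc, ih, Bool.true_and]
    · have hc : DSclass c = true := by rcases h2 with h | h | h <;> simp [DSclass, h]
      rw [hc, ih, Bool.true_and]
    · have hc : DSclass c = false := by
        by_contra hb
        simp only [DSclass, Bool.not_eq_false, Bool.or_eq_true, Bool.and_eq_true,
          decide_eq_true_eq] at hb
        rcases hb with ((hb | hb) | hb) | hb
        · exact h1 hb
        · exact h2 (Or.inl hb)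
        · exact h2 (Or.inr (Or.inl hb))
        · exact h2 (Or.inr (Or.inr hb))
      rw [hc, Bool.false_and]

-- ===== VERDICT (by name: the statement is the Claim_ definition above) =====
theorem DS_spec : Claim_equal_DS := by
  intro value _
  unfold Spec_DS DS DS_alt
  rw [DSloop_eq_all]
  rcases h : value.toList with _ | ⟨c, rest⟩
  · simp [PySem.Str.len_eq, h]
  · simp [PySem.Str.len_eq, h]
    intro _ _
    omega
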